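-- pv_equiv track=rewrite | github.com/druskacik/generating-23-12-8-code | index.py | create_incidence_matrix
-- ===== SOURCE A (Python) =====
-- def create_incidence_matrix(blocks, elements):
--   matrix = []
--   for block in blocks:
--     row = []
--     for e in elements:
--       row.append(1 if e in block else 0)
--     matrix.append(row)
--   return matrix
-- ===== SOURCE B (Python) =====
-- def create_incidence_matrix(blocks, elements):
--     index = {}
--     for j, e in enumerate(elements):
--         index[e] = index.get(e, []) + [j]
--     matrix = []
--     for block in blocks:
--         row = [0] * len(elements)
--         for m in block:
--             for j in index.get(m, []):
--                 row[j] = 1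
--         matrix.append(row)
--     return matrix
-- ===== Notes on version B (the rewrite author's own statement) =====
-- stated objective: faster
-- what changed: Instead of scanning every block for membership of every element (nested scans), B builds a value-to-columns index over elements once and scatter-writes 1s into zero-initialized rows by iterating each block's members.
import Mathlib
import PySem

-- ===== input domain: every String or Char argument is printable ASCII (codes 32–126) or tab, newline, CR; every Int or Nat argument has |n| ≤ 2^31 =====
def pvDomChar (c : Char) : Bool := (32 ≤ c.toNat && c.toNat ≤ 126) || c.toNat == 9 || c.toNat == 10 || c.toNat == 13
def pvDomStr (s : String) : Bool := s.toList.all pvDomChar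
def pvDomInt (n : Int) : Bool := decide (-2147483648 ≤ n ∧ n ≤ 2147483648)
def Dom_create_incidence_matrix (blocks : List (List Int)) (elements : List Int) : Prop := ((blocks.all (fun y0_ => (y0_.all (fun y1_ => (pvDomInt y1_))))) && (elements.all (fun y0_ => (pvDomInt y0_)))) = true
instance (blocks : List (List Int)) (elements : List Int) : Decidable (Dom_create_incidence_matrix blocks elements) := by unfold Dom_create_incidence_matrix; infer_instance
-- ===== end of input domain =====

-- B builds a value→columns index over `elements` once and scatter-writes 1s into
-- zero rows per block, instead of A's membership scan of every block for every element.


-- ===== PORT A =====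
-- for block in blocks: row = [1 if e in block else 0 for e in elements]; matrix.append(row)
def create_incidence_matrix (blocks : List (List Int)) (elements : List Int) : List (List Int) :=
  blocks.foldl
    (fun matrix block =>
      matrix ++ [elements.foldl (fun row e => row ++ [if block.contains e then (1 : Int) else 0]) []])
    []

-- ===== PORT B =====
-- index[e] = index.get(e, []) + [j]  for j, e in enumerate(elements)
def pvBuildIndex (elements : List Int) : PySem.Dict Int (List Int) :=
  (PySem.List.enumerate elements).foldl
    (fun d p => d.insert p.2 (d.getD p.2 [] ++ [p.1])) PySem.Dict.empty

-- row = [0]*len(elements); for m in block: for j in index.get(m, []): row[j] = 1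
def pvScatterRow (idx : PySem.Dict Int (List Int)) (n : Nat) (block : List Int) : List Int :=
  block.foldl
    (fun row m => (idx.getD m []).foldl (fun r j => PySem.List.pySetD r j 1) row)
    (List.replicate n 0)

def create_incidence_matrix_alt (blocks : List (List Int)) (elements : List Int) : List (List Int) :=
  let idx := pvBuildIndex elements
  blocks.foldl (fun matrix block => matrix ++ [pvScatterRow idx elements.length block]) []

-- ===== PRECONDITION & SPEC =====
def Spec_create_incidence_matrix (blocks : List (List Int)) (elements : List Int) (out : List (List Int)) : Prop := out = create_incidence_matrix_alt blocks elements
instance (blocks : List (List Int)) (elements : List Int) (out : List (List Int)) : Decidable (Spec_create_incidence_matrix blocks elements out) := by unfold Spec_create_incidence_matrix; infer_instance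

-- ===== CLAIM (what is proved, stated in full; the proofs are below) =====
def Claim_equal_create_incidence_matrix : Prop := ∀ (blocks : List (List Int)) (elements : List Int), Dom_create_incidence_matrix blocks elements → Spec_create_incidence_matrix blocks elements (create_incidence_matrix blocks elements)

-- ===== LEMMAS AND PROOFS =====

-- append-accumulator fold is a map
theorem pv_foldl_append_map {α β : Type} (f : α → β) :
    ∀ (xs : List α) (acc : List β), xs.foldl (fun r x => r ++ [f x]) acc = acc ++ xs.map f := by
  intro xs
  induction xs with
  | nil => simp
  | cons x xs ih => intro acc; simp [List.foldl, ih]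

-- the index groups columns by value
theorem pv_index_aux (m : Int) :
    ∀ (xs : List Int) (s : Int) (d : PySem.Dict Int (List Int)),
      ((PySem.List.enumerate xs s).foldl
        (fun d p => d.insert p.2 (d.getD p.2 [] ++ [p.1])) d).getD m []
      = d.getD m [] ++ ((PySem.List.enumerate xs s).filter (fun p => p.2 == m)).map (·.1) := by
  intro xs
  induction xs with
  | nil => simp [PySem.List.enumerate_nil]
  | cons x xs ih =>
    intro s d
    rw [PySem.List.enumerate_cons]
    simp only [List.foldl_cons, List.filter_cons]
    rw [ih]
    by_cases h : x = m
    · subst h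
      simp [PySem.Dict.getD_insert_self]
    · have hb : ((s, x).2 == m) = false := by simpa using h
      rw [PySem.Dict.getD_insert_of_ne _ _ _ (fun hh => h hh.symm)]
      simp [hb]

theorem pv_mem_index (elements : List Int) (m j : Int) :
    j ∈ (pvBuildIndex elements).getD m []
      ↔ ∃ (k : Nat) (h : k < elements.length), j = (k : Int) ∧ elements[k] = m := by
  unfold pvBuildIndex
  rw [pv_index_aux]
  simp only [PySem.Dict.getD_empty, List.nil_append, List.mem_map, List.mem_filter]
  constructor
  · rintro ⟨p, ⟨hp, hm⟩, rfl⟩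
    rcases (PySem.List.mem_enumerate_iff _ _ _).1 hp with ⟨k, hk, rfl⟩
    exact ⟨k, hk, by simp, by simpa using hm⟩
  · rintro ⟨k, hk, rfl, hm⟩
    refine ⟨((k : Int), elements[k]), ⟨?_, by simpa using hm⟩, rfl⟩
    exact (PySem.List.mem_enumerate_iff _ _ _).2 ⟨k, hk, by simp⟩

-- lengths are preserved by the scatter writes
theorem pv_len_setfold : ∀ (L : List Int) (r : List Int),
    (L.foldl (fun r j => PySem.List.pySetD r j 1) r).length = r.length := by
  intro L
  induction L with
  | nil => intro r; rfl
  | cons j L ih => intro r; simp [List.foldl, ih, PySem.List.length_pySetD]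

-- one inner scatter loop, pointwise
theorem pv_setfold_getElem? : ∀ (L : List Int), (∀ j ∈ L, 0 ≤ j) → ∀ (r : List Int) (k : Nat),
    (L.foldl (fun r j => PySem.List.pySetD r j 1) r)[k]?
      = if (k : Int) ∈ L ∧ k < r.length then some 1 else r[k]? := by
  intro L
  induction L with
  | nil => intro _ r k; simp
  | cons j L ih =>
    intro hL r k
    simp only [List.foldl_cons]
    rw [ih (fun x hx => hL x (List.mem_cons_of_mem _ hx))]
    rw [PySem.List.pySetD_of_nonneg r 1 (hL j (List.mem_cons_self))]
    have hj0 : 0 ≤ j := hL j List.mem_cons_self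
    rw [List.length_set, List.getElem?_set]
    by_cases hk : k < r.length
    · by_cases hmem : (k : Int) ∈ L
      · simp [hmem, hk, List.mem_cons_of_mem _ hmem]
      · by_cases hjk : j.toNat = k
        · have hc : (k : Int) ∈ j :: L := by rw [List.mem_cons]; left; omega
          simp [hmem, hk, hjk, hc]
        · have hc : ¬ (k : Int) ∈ j :: L := by
            rw [List.mem_cons]; exact fun h => h.elim (fun h1 => absurd h1 (by omega)) hmem
          simp [hmem, hjk, hc]
    · have hnone : r[k]? = none := List.getElem?_eq_none (by omega)
      by_cases hjk : j.toNat = k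
      · simp [hk, hjk]
      · simp [hk, hjk]

-- the whole row scatter, pointwise
theorem pv_scatter_getElem? (idx : PySem.Dict Int (List Int))
    (hidx : ∀ m j, j ∈ idx.getD m [] → 0 ≤ j) :
    ∀ (block : List Int) (r : List Int) (k : Nat),
    (block.foldl (fun row m => (idx.getD m []).foldl (fun r j => PySem.List.pySetD r j 1) row) r)[k]?
      = if (∃ m ∈ block, (k : Int) ∈ idx.getD m []) ∧ k < r.length then some 1 else r[k]? := by
  intro block
  induction block with
  | nil => intro r k; simp
  | cons m block ih =>
    intro r k
    simp only [List.foldl_cons]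
    rw [ih, pv_len_setfold, pv_setfold_getElem? _ (hidx m)]
    by_cases hrest : ∃ m' ∈ block, (k : Int) ∈ idx.getD m' []
    · rcases hrest with ⟨m', hm', hk⟩
      by_cases hk' : k < r.length
      · rw [if_pos (⟨⟨m', hm', hk⟩, hk'⟩ :
              (∃ m' ∈ block, (k : Int) ∈ idx.getD m' []) ∧ k < r.length)]
        rw [if_pos (⟨⟨m', List.mem_cons_of_mem _ hm', hk⟩, hk'⟩ :
              (∃ m'' ∈ m :: block, (k : Int) ∈ idx.getD m'' []) ∧ k < r.length)]
      · simp [hk']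
    · have h1 : ¬ ((∃ m' ∈ block, (k : Int) ∈ idx.getD m' []) ∧ k < r.length) := by
        intro h; exact hrest h.1
      rw [if_neg h1]
      by_cases hm : (k : Int) ∈ idx.getD m []
      · by_cases hk' : k < r.length
        · simp [hm, hk', List.mem_cons]
        · simp [hm, hk']
      · have h2 : ¬ ((∃ m' ∈ m :: block, (k : Int) ∈ idx.getD m' []) ∧ k < r.length) := by
          rintro ⟨⟨m', hm', hk⟩, _⟩
          rcases List.mem_cons.1 hm' with rfl | h
          · exact hm hk
          · exact hrest ⟨m', h, hk⟩
        rw [if_neg h2, if_neg (fun h : (k : Int) ∈ idx.getD m [] ∧ k < r.length => hm h.1)]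

theorem pv_row_eq (elements block : List Int) :
    pvScatterRow (pvBuildIndex elements) elements.length block
      = elements.map (fun e => if block.contains e then (1 : Int) else 0) := by
  have hidx : ∀ m j, j ∈ (pvBuildIndex elements).getD m [] → 0 ≤ j := by
    intro m j hj
    rcases (pv_mem_index elements m j).1 hj with ⟨k, _, rfl, _⟩
    exact Int.natCast_nonneg k
  apply List.ext_getElem?
  intro k
  unfold pvScatterRow
  rw [pv_scatter_getElem? _ hidx]
  by_cases hk : k < elements.length
  · have hmemiff : (∃ m ∈ block, (k : Int) ∈ (pvBuildIndex elements).getD m [])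
        ↔ elements[k] ∈ block := by
      constructor
      · rintro ⟨m, hm, hkm⟩
        rcases (pv_mem_index elements m _).1 hkm with ⟨k', _, hkk, he⟩
        have : k' = k := by omega
        subst this; subst he; exact hm
      · intro h
        exact ⟨elements[k], h, (pv_mem_index elements _ _).2 ⟨k, hk, rfl, rfl⟩⟩
    rw [List.getElem?_map, List.getElem?_eq_getElem hk]
    by_cases hb : elements[k] ∈ block
    · rw [if_pos ⟨hmemiff.2 hb, by simpa using hk⟩]
      simp [hb]
    · rw [if_neg (by rw [List.length_replicate]; rintro ⟨h, _⟩; exact hb (hmemiff.1 h))]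
      rw [List.getElem?_replicate]
      simp [hk, hb]
  · have hk' : ¬ k < (List.replicate elements.length (0 : Int)).length := by
      simpa using hk
    rw [if_neg (fun h => hk' h.2)]
    rw [List.getElem?_eq_none (by simpa using hk), List.getElem?_eq_none (by simp; omega)]

-- ===== VERDICT (by name: the statement is the Claim_ definition above) =====
theorem create_incidence_matrix_spec : Claim_equal_create_incidence_matrix := by
  intro blocks elements _
  show create_incidence_matrix blocks elements = create_incidence_matrix_alt blocks elements
  unfold create_incidence_matrix create_incidence_matrix_alt
  rw [pv_foldl_append_map, pv_foldl_append_map]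
  simp only [List.nil_append]
  apply List.map_congr_left
  intro block _
  rw [pv_foldl_append_map, List.nil_append, pv_row_eq]
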